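-- pv_equiv track=rewrite | github.com/BangSungjoon/Algorithm_Study | mkh/week17/150367/sol2.py | solution
-- ===== SOURCE A (Python) =====
-- def solution(numbers):
--     for i in range(len(numbers)):
--         # 2진수로 변환
--         binary = bin(numbers[i])[2:]
--         l = len(binary)
--         h = 1
--
--         # 트리의 높이를 찾아서 포화이진트리가 될 때까지 0을 앞에다 채워준다.
--         while (2**h-1)<l:
--             h += 1
--         binary = binary.zfill(2**h-1)
--
--         def check_tree(s):
--             # 리프 노드일 경우 1이든 0이든 문제 없으니까 항상 True
--             if len(s) == 1:
--                 return True
--             # 해당 서브 트리의 루트 노드는 정 중앙에 있는 값이므로 해당 값을 탐색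
--             mid = len(s)//2
--             # 루트 노드가 0이라면 내 아래에 있는 모든 노드들은 0이어야 함. 해당 경우를 만족하는 경우 True
--             if s[mid] == '0':
--                 return all(x == '0' for x in s)
--             else:
--                 # 루트 노드가 0이고 그 아래에 1이 있는 경우를 제외하고선 항상 True
--                 return check_tree(s[:mid]) and check_tree(s[mid + 1:])
--         # return값이 bool이므로 문제의 형태에 맞춰 정수형으로 변환하여 리턴
--         numbers[i] = int(check_tree(binary))
--     return numbers
-- ===== SOURCE B (Python) =====
-- def solution(numbers):
--     # Flat arithmetic level-scan over the implicit heap layout instead of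
--     # recursive segment splitting: a tree is valid iff no '0' parent has a
--     # non-'0' child, checked with index arithmetic on the in-order string.
--     for k in range(len(numbers)):
--         s = bin(numbers[k])[2:]
--         h = 1
--         while 2 ** h - 1 < len(s):
--             h += 1
--         n = 2 ** h - 1
--         s = s.zfill(n)
--         ok = True
--         step = 2 ** h            # segment width of the current level's subtrees
--         while step >= 4:         # subtrees of length step-1 >= 3 have children
--             g = step // 4        # distance from a parent to each of its children
--             for p in range(step // 2 - 1, n, step):
--                 if s[p] == '0' and (s[p - g] != '0' or s[p + g] != '0'):
--                     ok = False
--             step //= 2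
--         numbers[k] = int(ok)
--     return numbers
-- ===== Notes on version B (the rewrite author's own statement) =====
-- stated objective: alternative
-- what changed: A validates each tree by recursive in-order segment splitting with an all()-rescan whenever a subtree root is '0'; B instead does a non-recursive arithmetic level scan over the implicit heap layout, checking for every parent position that a '0' parent has no non-'0' child, using only index arithmetic (parent at j*2^e+2^(e-1)-1, children at distance 2^(e-2)).
import Mathlib
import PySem

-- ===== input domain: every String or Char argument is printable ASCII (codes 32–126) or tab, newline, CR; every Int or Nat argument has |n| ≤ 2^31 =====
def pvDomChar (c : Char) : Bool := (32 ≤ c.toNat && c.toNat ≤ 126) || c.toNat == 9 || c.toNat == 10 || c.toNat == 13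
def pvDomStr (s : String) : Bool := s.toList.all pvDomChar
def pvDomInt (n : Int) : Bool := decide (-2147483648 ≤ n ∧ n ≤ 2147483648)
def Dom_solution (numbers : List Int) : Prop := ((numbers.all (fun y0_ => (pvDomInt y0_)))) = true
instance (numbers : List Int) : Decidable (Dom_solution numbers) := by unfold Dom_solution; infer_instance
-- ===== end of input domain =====

-- B replaces A's recursive in-order segment-splitting check (with an all()-rescan at '0' roots) by a
-- non-recursive arithmetic level scan over the implicit heap layout; same results, same cost.
-- A mutates its argument list in place and returns it; B performs the same mutation, and the
-- equivalence proved here is about the RETURN value.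

-- shared helper: the height-finding "while (2**h-1)<l: h += 1" loop, textually identical in Source A and Source B
def findHeight (l : Nat) (h : Nat) : Nat :=
  if 2 ^ h - 1 < l then findHeight l (h + 1) else h
termination_by l - h
decreasing_by
  have := Nat.lt_two_pow_self (n := h)
  omega

-- ===== PORT A =====
-- check_tree(s): recursion on the in-order string; s[mid] is in range whenever len(s) ≥ 2, so the
-- getD default is never consulted (len(s) = 0 never occurs: A calls it only on lengths 2^h - 1 ≥ 1)
def checkTree (s : List Char) : Bool :=
  if _hle : s.length ≤ 1 then true
  else if s.getD (s.length / 2) ' ' = '0' then s.all (· == '0')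
  else checkTree (s.take (s.length / 2)) && checkTree (s.drop (s.length / 2 + 1))
termination_by s.length
decreasing_by
  · simp only [List.length_take]; omega
  · simp only [List.length_drop]; omega

-- the in-place loop "numbers[i] = int(check_tree(...))" writes each slot once from its own old
-- value, so it is the map of the per-element computation
def solution (numbers : List Int) : List Int :=
  numbers.map (fun n =>
    let binary := (PySem.Int.toBinChars0b n).drop 2        -- bin(numbers[i])[2:]
    let h := findHeight binary.length 1
    let b := PySem.Chars.zfill binary ((2 ^ h - 1 : Nat) : Int)
    if checkTree b then 1 else 0)

-- ===== PORT B =====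
-- the "while step >= 4" level loop of Source B; every generated index p and p ± g is in range
-- (proved below), so the pyGetD default is never consulted
def bLevel (s : List Char) (stepN : Nat) (ok : Bool) : Bool :=
  if _h4 : 4 ≤ stepN then
    bLevel s (stepN / 2)
      ((PySem.List.pyRange ((stepN / 2 - 1 : Nat) : Int) ((s.length : Nat) : Int) ((stepN : Nat) : Int)).foldl
        (fun acc p =>
          if PySem.List.pyGetD s p ' ' = '0' ∧
             (PySem.List.pyGetD s (p - ((stepN / 4 : Nat) : Int)) ' ' ≠ '0' ∨
              PySem.List.pyGetD s (p + ((stepN / 4 : Nat) : Int)) ' ' ≠ '0')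
          then false else acc) ok)
  else ok
termination_by stepN
decreasing_by omega

def solution_alt (numbers : List Int) : List Int :=
  numbers.map (fun n =>
    let s := (PySem.Int.toBinChars0b n).drop 2             -- bin(numbers[k])[2:]
    let h := findHeight s.length 1
    let t := PySem.Chars.zfill s ((2 ^ h - 1 : Nat) : Int)
    if bLevel t (2 ^ h) true then 1 else 0)

-- ===== PRECONDITION & SPEC =====
def Spec_solution (numbers : List Int) (out : List Int) : Prop := out = solution_alt numbers
instance (numbers : List Int) (out : List Int) : Decidable (Spec_solution numbers out) := by unfold Spec_solution; infer_instance

-- ===== CLAIM (what is proved, stated in full; the proofs are below) =====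
def Claim_equal_solution : Prop := ∀ (numbers : List Int), Dom_solution numbers → Spec_solution numbers (solution numbers)

-- ===== LEMMAS AND PROOFS =====

def gD (s : List Char) (p : Nat) : Char := s.getD p ' '
def posE (e j : Nat) : Nat := j * 2 ^ e + 2 ^ (e - 1) - 1
def condE (s : List Char) (e j : Nat) : Prop :=
  gD s (posE e j) = '0' → gD s (posE e j - 2 ^ (e - 2)) = '0' ∧ gD s (posE e j + 2 ^ (e - 2)) = '0'
def Good (s : List Char) (h : Nat) : Prop :=
  ∀ e j, 2 ≤ e → e ≤ h → j < 2 ^ (h - e) → condE s e j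

theorem decomp (h : Nat) : ∀ p, p < 2 ^ h - 1 →
    ∃ e j, 1 ≤ e ∧ e ≤ h ∧ j < 2 ^ (h - e) ∧ p = posE e j := by
  induction h with
  | zero => intro p hp; omega
  | succ k ih =>
    intro p hp
    rcases lt_trichotomy p (2 ^ k - 1) with hlt | heq | hgt
    · obtain ⟨e, j, h1, h2, h3, h4⟩ := ih p hlt
      exact ⟨e, j, h1, by omega, by
        have : 2 ^ (k - e) ≤ 2 ^ (k + 1 - e) := Nat.pow_le_pow_right (by norm_num) (by omega)
        omega, h4⟩
    · refine ⟨k + 1, 0, by omega, le_refl _, by simp, ?_⟩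
      simp [posE]; omega
    · have hk1 : 2 ^ (k + 1) = 2 * 2 ^ k := by ring
      have h1 : 1 ≤ 2 ^ k := Nat.one_le_two_pow
      obtain ⟨e, j, he1, he2, he3, he4⟩ := ih (p - 2 ^ k) (by omega)
      refine ⟨e, j + 2 ^ (k - e), he1, by omega, ?_, ?_⟩
      · have : 2 ^ (k + 1 - e) = 2 * 2 ^ (k - e) := by
          rw [← pow_succ']; congr 1; omega
        omega
      · have hpow : 2 ^ (k - e) * 2 ^ e = 2 ^ k := by
          rw [← pow_add]; congr 1; omega
        have h2 : 1 ≤ 2 ^ (e - 1) := Nat.one_le_two_pow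
        simp only [posE] at he4 ⊢
        rw [Nat.add_mul]
        omega

theorem allzero_of_good (s : List Char) (h : Nat) (hh : 1 ≤ h)
    (hg : Good s h) (hr : gD s (2 ^ (h - 1) - 1) = '0') :
    ∀ e j, 1 ≤ e → e ≤ h → j < 2 ^ (h - e) → gD s (posE e j) = '0' := by
  -- downward induction: on d = h - e
  suffices H : ∀ d e j, e = h - d → 1 ≤ e → e ≤ h → j < 2 ^ (h - e) → gD s (posE e j) = '0' by
    intro e j h1 h2 h3
    exact H (h - e) e j (by omega) h1 h2 h3
  intro d
  induction d with
  | zero =>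
    intro e j he h1 h2 h3
    have : e = h := by omega
    subst this
    have : j = 0 := by simpa using h3
    subst this
    simpa [posE] using hr
  | succ d ih =>
    intro e j he h1 h2 h3
    by_cases hde : h - d ≤ e
    · -- then e = h - d ≥ ... wait e = h - (d+1); if also h - d ≤ e then d ≥ ... handle via ih directly
      exact ih e j (by omega) h1 h2 h3
    · have he' : e = h - (d + 1) := he
      have heq : e + 1 = h - d := by omega
      -- parent at level e+1, index j/2
      have hj2 : j / 2 < 2 ^ (h - (e + 1)) := by
        have : 2 ^ (h - e) = 2 * 2 ^ (h - (e + 1)) := by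
          rw [← pow_succ']; congr 1; omega
        omega
      have hpar : gD s (posE (e + 1) (j / 2)) = '0' :=
        ih (e + 1) (j / 2) (by omega) (by omega) (by omega) hj2
      have hcond := hg (e + 1) (j / 2) (by omega) (by omega) hj2
      have hch := hcond hpar
      -- identify pos of j among the two children
      have hE : 1 ≤ 2 ^ (e - 1) := Nat.one_le_two_pow
      have h2e : 2 ^ (e + 1) = 2 * 2 ^ e := by ring
      have h2e' : 2 ^ e = 2 * 2 ^ (e - 1) := by
        rw [← pow_succ']; congr 1; omega
      have hsimp1 : (e + 1) - 1 = e := by omega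
      have hsimp2 : (e + 1) - 2 = e - 1 := by omega
      have e2 : (2:Nat) ^ e = 2 * 2 ^ (e-1) := by
        have hp := pow_succ (2:Nat) (e-1)
        rw [show (e-1)+1 = e from by omega] at hp
        omega
      have e3 : (2:Nat) ^ (e+1) = 4 * 2 ^ (e-1) := by
        have hp := pow_add (2:Nat) (e-1) 2
        rw [show (e-1)+2 = e+1 from by omega] at hp
        omega
      rcases Nat.even_or_odd j with ⟨q, hq⟩ | ⟨q, hq⟩
      · have hj2q : j / 2 = q := by omega
        have hpos : posE (e+1) (j/2) - 2 ^ ((e+1)-2) = posE e j := by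
          rw [hj2q, hq, hsimp2]
          simp only [posE, hsimp1]
          rw [e2, e3]
          have h1 : q * (4 * 2^(e-1)) = (q+q) * (2*2^(e-1)) := by ring
          omega
        exact hpos ▸ hch.1
      · have hj2q : j / 2 = q := by omega
        have hpos : posE (e+1) (j/2) + 2 ^ ((e+1)-2) = posE e j := by
          rw [hj2q, hq, hsimp2]
          simp only [posE, hsimp1]
          rw [e2, e3]
          have h1 : (2*q+1) * (2*2^(e-1)) = q * (4*2^(e-1)) + 2*2^(e-1) := by ring
          omega
        exact hpos ▸ hch.2

theorem gD_take (s : List Char) (m p : Nat) (hp : p < m) : gD (s.take m) p = gD s p := by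
  simp [gD, List.getD_eq_getElem?_getD, hp]

theorem gD_drop (s : List Char) (m p : Nat) : gD (s.drop m) p = gD s (m + p) := by
  simp [gD, List.getD_eq_getElem?_getD]

theorem pow_em1 (e : Nat) (h2 : 1 ≤ e) : (2:Nat) ^ e = 2 * 2 ^ (e-1) := by
  have hp := pow_succ (2:Nat) (e-1)
  rw [show (e-1)+1 = e from by omega] at hp
  omega

theorem pow_em2 (e : Nat) (h2 : 2 ≤ e) : (2:Nat) ^ e = 4 * 2 ^ (e-2) := by
  have hp := pow_add (2:Nat) (e-2) 2
  rw [show (e-2)+2 = e from by omega] at hp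
  omega

theorem pos_ge (e j : Nat) (h2 : 2 ≤ e) : 2 ^ (e-2) ≤ posE e j := by
  have e1 : (2:Nat)^(e-1) = 2*2^(e-2) := by
    have := pow_em2 e h2
    have := pow_em1 e (by omega)
    omega
  have hA : 1 ≤ (2:Nat)^(e-2) := Nat.one_le_two_pow
  simp only [posE]
  omega

theorem pos_bound (h e j : Nat) (h2 : 2 ≤ e) (hh : e ≤ h) (hj : j < 2 ^ (h - e)) :
    posE e j + 2 ^ (e - 2) < 2 ^ h - 1 := by
  have e0 := pow_em2 e h2
  have e1 : (2:Nat)^(e-1) = 2*2^(e-2) := by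
    have := pow_em1 e (by omega); omega
  have eh : (2:Nat)^h = 2^(h-e) * 2^e := by
    have hp := pow_add (2:Nat) (h-e) e
    rw [show (h-e)+e = h from by omega] at hp
    omega
  rw [e0] at eh
  have hA : 1 ≤ (2:Nat)^(e-2) := Nat.one_le_two_pow
  have hmul : (j+1) * (4*2^(e-2)) ≤ 2^(h-e) * (4*2^(e-2)) :=
    Nat.mul_le_mul_right _ (by omega)
  have hexp : (j+1) * (4*2^(e-2)) = j*(4*2^(e-2)) + 4*2^(e-2) := by ring
  simp only [posE]
  rw [e0, e1]
  omega

theorem pos_shift (k e j : Nat) (h2 : 2 ≤ e) (he : e ≤ k) :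
    posE e (j + 2 ^ (k - e)) = 2 ^ k + posE e j := by
  have e0 := pow_em2 e h2
  have eh : (2:Nat)^k = 2^(k-e) * 2^e := by
    have hp := pow_add (2:Nat) (k-e) e
    rw [show (k-e)+e = k from by omega] at hp
    omega
  have hA : 1 ≤ (2:Nat)^(e-1) := Nat.one_le_two_pow
  simp only [posE]
  have hexp : (j + 2^(k-e)) * 2^e = j * 2^e + 2^(k-e) * 2^e := by ring
  omega

theorem condE_take (s : List Char) (k e j : Nat) (h2 : 2 ≤ e) (he : e ≤ k) (hj : j < 2^(k-e)) :
    condE (s.take (2 ^ k - 1)) e j ↔ condE s e j := by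
  have hb := pos_bound k e j h2 he hj
  have hg := pos_ge e j h2
  unfold condE
  generalize (2:Nat) ^ k - 1 = K at hb ⊢
  generalize (2:Nat) ^ (e-2) = A at hb hg ⊢
  rw [gD_take _ _ _ (by omega), gD_take _ _ _ (by omega), gD_take _ _ _ (by omega)]

theorem condE_drop (s : List Char) (k e j : Nat) (h2 : 2 ≤ e) (he : e ≤ k) :
    condE (s.drop (2 ^ k)) e j ↔ condE s e (j + 2 ^ (k - e)) := by
  have hg := pos_ge e j h2
  have hsh := pos_shift k e j h2 he
  unfold condE
  rw [gD_drop, gD_drop, gD_drop]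
  generalize (2:Nat) ^ (e-2) = A at hg ⊢
  generalize (2:Nat) ^ k = K at hsh ⊢
  rw [show K + posE e j = posE e (j + 2^(k-e)) from by omega,
      show K + (posE e j - A) = posE e (j + 2^(k-e)) - A from by omega,
      show K + (posE e j + A) = posE e (j + 2^(k-e)) + A from by omega]

theorem good_split (s : List Char) (k : Nat) (_hk : 1 ≤ k) :
    Good s (k + 1) ↔
      condE s (k + 1) 0 ∧ Good (s.take (2 ^ k - 1)) k ∧ Good (s.drop (2 ^ k)) k := by
  have hpow : ∀ e, e ≤ k → (2:Nat) ^ (k+1-e) = 2 * 2 ^ (k-e) := by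
    intro e hek
    have hp := pow_succ (2:Nat) (k-e)
    rw [show (k-e)+1 = k+1-e from by omega] at hp
    omega
  constructor
  · intro hg
    refine ⟨hg (k+1) 0 (by omega) le_rfl (by simp), ?_, ?_⟩
    · intro e j he2 hek hj
      rw [condE_take s k e j he2 hek hj]
      exact hg e j he2 (by omega) (by have := hpow e hek; omega)
    · intro e j he2 hek hj
      rw [condE_drop s k e j he2 hek]
      exact hg e (j + 2^(k-e)) he2 (by omega) (by have := hpow e hek; omega)
  · rintro ⟨hc, htake, hdrop⟩ e j he2 he' hj
    by_cases hek : e = k + 1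
    · subst hek
      have : j = 0 := by simpa using hj
      subst this
      exact hc
    · have hek' : e ≤ k := by omega
      rw [hpow e hek'] at hj
      by_cases hsmall : j < 2 ^ (k - e)
      · exact (condE_take s k e j he2 hek' hsmall).1 (htake e j he2 hek' hsmall)
      · have hj' : j - 2^(k-e) < 2^(k-e) := by omega
        have := (condE_drop s k e (j - 2^(k-e)) he2 hek').1 (hdrop e (j - 2^(k-e)) he2 hek' hj')
        rwa [show j - 2^(k-e) + 2^(k-e) = j from by omega] at this

theorem all_zero_iff (s : List Char) :
    s.all (· == '0') = true ↔ ∀ p, p < s.length → gD s p = '0' := by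
  simp only [List.all_eq_true, beq_iff_eq]
  constructor
  · intro hall p hp
    simp only [gD, List.getD_eq_getElem?_getD, List.getElem?_eq_getElem hp, Option.getD_some]
    exact hall _ (s.getElem_mem hp)
  · intro h x hx
    obtain ⟨i, hi, rfl⟩ := List.mem_iff_getElem.1 hx
    have := h i hi
    simpa [gD, List.getD_eq_getElem?_getD, List.getElem?_eq_getElem hi] using this

theorem checkTree_iff (h : Nat) : ∀ s : List Char, s.length = 2 ^ h - 1 →
    (checkTree s = true ↔ Good s h) := by
  induction h with
  | zero =>
    intro s hs
    have h0 : s.length = 0 := by simpa using hs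
    have : s.length ≤ 1 := by omega
    rw [checkTree, dif_pos this]
    simp only [true_iff]
    intro e j he2 he' hj
    omega
  | succ k ih =>
    intro s hs
    by_cases hk0 : k = 0
    · subst hk0
      have : s.length ≤ 1 := by omega
      rw [checkTree, dif_pos this]
      simp only [true_iff]
      intro e j he2 he' hj
      omega
    · have hk1 : 1 ≤ k := by omega
      have hpk : (2:Nat) ^ (k+1) = 2 * 2 ^ k := by
        have := pow_succ (2:Nat) k; omega
      have h2k : 2 ≤ (2:Nat) ^ k := by
        have : (2:Nat) ^ 1 ≤ 2 ^ k := Nat.pow_le_pow_right (by norm_num) hk1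
        omega
      have hlen3 : 3 ≤ s.length := by omega
      have hmid : s.length / 2 = 2 ^ k - 1 := by omega
      rw [checkTree, dif_neg (by omega : ¬ s.length ≤ 1), hmid,
          show 2 ^ k - 1 + 1 = 2 ^ k from by omega]
      by_cases hr : s.getD (2 ^ k - 1) ' ' = '0'
      · rw [if_pos hr, all_zero_iff]
        constructor
        · intro hall e j he2 he' hj _
          have hb := pos_bound (k+1) e j he2 he' hj
          have hgp := pos_ge e j he2
          have hbb : posE e j - 2^(e-2) < s.length ∧ posE e j + 2^(e-2) < s.length := by
            generalize (2:Nat) ^ (e-2) = A at hb hgp ⊢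
            generalize (2:Nat) ^ (k+1) = T at hb hs ⊢
            omega
          exact ⟨hall _ hbb.1, hall _ hbb.2⟩
        · intro hgood p hp
          obtain ⟨e, j, he1, he2, hj, rfl⟩ := decomp (k+1) p (by omega)
          exact allzero_of_good s (k+1) (by omega) hgood
            (by simpa [show k + 1 - 1 = k from rfl] using hr) e j he1 he2 hj
      · rw [if_neg hr]
        have hlt : (s.take (2 ^ k - 1)).length = 2 ^ k - 1 := by
          simp only [List.length_take]; omega
        have hdr : (s.drop (2 ^ k)).length = 2 ^ k - 1 := by
          simp only [List.length_drop]; omega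
        rw [Bool.and_eq_true, ih _ hlt, ih _ hdr, good_split s k hk1]
        have hc : condE s (k + 1) 0 := by
          intro h0
          exact absurd (by simpa [posE] using h0) hr
        tauto

theorem foldl_if_false {α : Type} (q : α → Prop) [DecidablePred q] (l : List α) (ok : Bool) :
    l.foldl (fun acc p => if q p then false else acc) ok
      = (ok && l.all (fun p => decide ¬ q p)) := by
  induction l generalizing ok with
  | nil => simp
  | cons x xs ih =>
    simp only [List.foldl_cons, List.all_cons, ih]
    by_cases hq : q x <;> simp [hq]

theorem bLevel_iff (h : Nat) (s : List Char) (hs : s.length = 2 ^ h - 1) :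
    ∀ e, e ≤ h → ∀ ok : Bool,
      (bLevel s (2 ^ e) ok = true ↔
        ok = true ∧ ∀ e' j, 2 ≤ e' → e' ≤ e → j < 2 ^ (h - e') → condE s e' j) := by
  intro e
  induction e with
  | zero =>
    intro _ ok
    rw [bLevel, dif_neg (by norm_num)]
    constructor
    · intro hok; exact ⟨hok, fun e' j h2 h1 _ => by omega⟩
    · exact And.left
  | succ e ih =>
    intro heh ok
    by_cases he0 : e = 0
    · subst he0
      rw [bLevel, dif_neg (by norm_num)]
      constructor
      · intro hok; exact ⟨hok, fun e' j h2 h1 _ => by omega⟩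
      · exact And.left
    · have he1 : 1 ≤ e := by omega
      have hp1 : (2:Nat) ^ (e+1) = 2 * 2 ^ e := by have := pow_succ (2:Nat) e; omega
      have hp0 : (2:Nat) ^ e = 2 * 2 ^ (e-1) := pow_em1 e he1
      have h2e : 2 ≤ (2:Nat) ^ e := by
        have : (2:Nat) ^ 1 ≤ 2 ^ e := Nat.pow_le_pow_right (by norm_num) he1
        omega
      rw [bLevel, dif_pos (by omega),
          show 2 ^ (e+1) / 2 = 2 ^ e from by omega,
          show 2 ^ (e+1) / 4 = 2 ^ (e-1) from by omega]
      rw [foldl_if_false]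
      -- the big-level all-check equals the e+1 layer of conditions
      have hlevel :
          ((PySem.List.pyRange ((2 ^ e - 1 : Nat) : Int) ((s.length : Nat) : Int) ((2 ^ (e+1) : Nat) : Int)).all
            (fun p => decide ¬ (PySem.List.pyGetD s p ' ' = '0' ∧
              (PySem.List.pyGetD s (p - ((2 ^ (e-1) : Nat) : Int)) ' ' ≠ '0' ∨
               PySem.List.pyGetD s (p + ((2 ^ (e-1) : Nat) : Int)) ' ' ≠ '0'))) = true)
          ↔ (∀ j, j < 2 ^ (h - (e+1)) → condE s (e+1) j) := by
      -- bridge one position: p = posE (e+1) j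
        have hone : ∀ j : Nat, j < 2 ^ (h - (e+1)) →
            ((¬ (PySem.List.pyGetD s ((posE (e+1) j : Nat) : Int) ' ' = '0' ∧
              (PySem.List.pyGetD s (((posE (e+1) j : Nat) : Int) - ((2 ^ (e-1) : Nat) : Int)) ' ' ≠ '0' ∨
               PySem.List.pyGetD s (((posE (e+1) j : Nat) : Int) + ((2 ^ (e-1) : Nat) : Int)) ' ' ≠ '0')))
              ↔ condE s (e+1) j) := by
          intro j hj
          have hgp := pos_ge (e+1) j (by omega)
          have hcast1 : ((posE (e+1) j : Nat) : Int) - ((2 ^ (e-1) : Nat) : Int)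
              = ((posE (e+1) j - 2 ^ (e-1) : Nat) : Int) := by
            have h21 : (e+1) - 2 = e - 1 := by omega
            rw [h21] at hgp
            omega
          have hcast2 : ((posE (e+1) j : Nat) : Int) + ((2 ^ (e-1) : Nat) : Int)
              = ((posE (e+1) j + 2 ^ (e-1) : Nat) : Int) := by push_cast; ring
          rw [hcast1, hcast2, PySem.List.pyGetD_natCast, PySem.List.pyGetD_natCast,
              PySem.List.pyGetD_natCast]
          unfold condE
          rw [show (e+1) - 2 = e - 1 from by omega]
          show _ ↔ (gD s _ = '0' → gD s _ = '0' ∧ gD s _ = '0')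
          simp only [gD]
          tauto
        rw [List.all_eq_true]
        constructor
        · intro hall j hj
          rw [← hone j hj]
          have he2 : 2 ≤ e + 1 := by omega
          have hb := pos_bound h (e+1) j he2 heh hj
          have hgp := pos_ge (e+1) j he2
          have hpe : posE (e+1) j = j * 2 ^ (e+1) + 2 ^ e - 1 := by
            simp only [posE, Nat.add_sub_cancel]
          have hmem : ((posE (e+1) j : Nat) : Int) ∈
              PySem.List.pyRange ((2 ^ e - 1 : Nat) : Int) ((s.length : Nat) : Int) ((2 ^ (e+1) : Nat) : Int) := by
            rw [PySem.List.mem_pyRange_iff_of_pos (Int.natCast_pos.mpr (Nat.two_pow_pos _))]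
            have c1 : 2 ^ e - 1 ≤ posE (e+1) j := by
              generalize (2:Nat) ^ e = A at hpe h2e ⊢
              omega
            have c2 : posE (e+1) j < s.length := by
              rw [hs]
              generalize hg2 : (2:Nat) ^ ((e+1)-2) = A at hb hgp
              generalize (2:Nat) ^ h = T at hb ⊢
              omega
            refine ⟨by exact_mod_cast c1, by exact_mod_cast c2, ?_⟩
            · have hsub : ((posE (e+1) j : Nat) : Int) - ((2 ^ e - 1 : Nat) : Int)
                  = ((j * 2 ^ (e+1) : Nat) : Int) := by
                have : posE (e+1) j = j * 2 ^ (e+1) + (2 ^ e - 1) := by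
                  generalize (2:Nat) ^ e = A at hpe h2e ⊢
                  omega
                rw [this]
                push_cast
                ring
              rw [hsub]
              exact ⟨(j : Int), by push_cast; ring⟩
          have := hall _ hmem
          rwa [decide_eq_true_iff] at this
        · intro hgood x hx
          rw [decide_eq_true_iff]
          rw [PySem.List.mem_pyRange_iff_of_pos (Int.natCast_pos.mpr (Nat.two_pow_pos _))] at hx
          obtain ⟨hax, hxb, hdvd⟩ := hx
          have hx0 : 0 ≤ x := le_trans (by exact_mod_cast Int.natCast_nonneg _) hax
          obtain ⟨xn, rfl⟩ := Int.eq_ofNat_of_zero_le hx0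
          have haxn : 2 ^ e - 1 ≤ xn := by exact_mod_cast hax
          have hxbn : xn < s.length := by exact_mod_cast hxb
          have hdvdn : 2 ^ (e+1) ∣ xn - (2 ^ e - 1) := by
            have : ((xn - (2 ^ e - 1) : Nat) : Int) = (xn : Int) - ((2 ^ e - 1 : Nat) : Int) := by
              omega
            exact_mod_cast this ▸ hdvd
          obtain ⟨mn, hmn⟩ := hdvdn
          have hjlt : mn < 2 ^ (h - (e+1)) := by
            by_contra hge
            have hmul : 2 ^ (e+1) * 2 ^ (h - (e+1)) ≤ 2 ^ (e+1) * mn :=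
              Nat.mul_le_mul_left _ (by omega)
            have hpow : (2:Nat) ^ (e+1) * 2 ^ (h - (e+1)) = 2 ^ h := by
              rw [← pow_add]
              congr 1
              omega
            rw [hs] at hxbn
            generalize hT : (2:Nat) ^ h = T at hxbn hpow
            generalize hM : (2:Nat) ^ (e+1) * mn = M at hmn hmul
            generalize (2:Nat) ^ e = A at haxn hmn h2e
            omega
          have hxe : xn = posE (e+1) mn := by
            have hpe : posE (e+1) mn = mn * 2 ^ (e+1) + 2 ^ e - 1 := by
              simp only [posE, Nat.add_sub_cancel]
            have hcomm : mn * 2 ^ (e+1) = 2 ^ (e+1) * mn := by ring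
            rw [hcomm] at hpe
            generalize hM : (2:Nat) ^ (e+1) * mn = M at hmn hpe
            generalize (2:Nat) ^ e = A at haxn hmn hpe h2e
            omega
          rw [show ((xn : Nat) : Int) = ((posE (e+1) mn : Nat) : Int) from by rw [hxe]]
          exact (hone mn hjlt).2 (hgood mn hjlt)
      rw [ih (by omega)]
      rw [Bool.and_eq_true]
      constructor
      · rintro ⟨⟨hok, hlv⟩, hrest⟩
        refine ⟨hok, fun e' j h2 h1 hj => ?_⟩
        by_cases hee : e' = e + 1
        · subst hee; exact hlevel.1 hlv j hj
        · exact hrest e' j h2 (by omega) hj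
      · rintro ⟨hok, hall⟩
        refine ⟨⟨hok, hlevel.2 (fun j hj => hall (e+1) j (by omega) le_rfl hj)⟩, fun e' j h2 h1 hj => hall e' j h2 (by omega) hj⟩

theorem findHeight_spec (l : Nat) : ∀ h0, h0 ≤ findHeight l h0 ∧ l ≤ 2 ^ (findHeight l h0) - 1 := by
  intro h0
  induction h0 using findHeight.induct l with
  | case1 h0 hlt ih => rw [findHeight]; simp only [hlt, if_true]; omega
  | case2 h0 hlt => rw [findHeight]; simp only [hlt, if_false]; omega

theorem element_eq (n : Int) :
    (let binary := (PySem.Int.toBinChars0b n).drop 2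
     let h := findHeight binary.length 1
     let b := PySem.Chars.zfill binary ((2 ^ h - 1 : Nat) : Int)
     (if checkTree b then (1 : Int) else 0))
    = (let s := (PySem.Int.toBinChars0b n).drop 2
       let h := findHeight s.length 1
       let t := PySem.Chars.zfill s ((2 ^ h - 1 : Nat) : Int)
       (if bLevel t (2 ^ h) true then (1 : Int) else 0)) := by
  dsimp only
  obtain ⟨hh1, hle⟩ := findHeight_spec ((PySem.Int.toBinChars0b n).drop 2).length 1
  have htlen : (PySem.Chars.zfill ((PySem.Int.toBinChars0b n).drop 2)
      ((2 ^ findHeight ((PySem.Int.toBinChars0b n).drop 2).length 1 - 1 : Nat) : Int)).length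
      = 2 ^ findHeight ((PySem.Int.toBinChars0b n).drop 2).length 1 - 1 := by
    rw [PySem.Chars.length_zfill, Int.toNat_natCast]
    omega
  have hbool : checkTree (PySem.Chars.zfill ((PySem.Int.toBinChars0b n).drop 2)
        ((2 ^ findHeight ((PySem.Int.toBinChars0b n).drop 2).length 1 - 1 : Nat) : Int))
      = bLevel (PySem.Chars.zfill ((PySem.Int.toBinChars0b n).drop 2)
        ((2 ^ findHeight ((PySem.Int.toBinChars0b n).drop 2).length 1 - 1 : Nat) : Int))
        (2 ^ findHeight ((PySem.Int.toBinChars0b n).drop 2).length 1) true := by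
    rw [Bool.eq_iff_iff,
        checkTree_iff (findHeight ((PySem.Int.toBinChars0b n).drop 2).length 1) _ htlen,
        bLevel_iff (findHeight ((PySem.Int.toBinChars0b n).drop 2).length 1) _ htlen _ le_rfl true]
    exact ⟨fun hg => ⟨rfl, hg⟩, fun hp => hp.2⟩
  rw [hbool]

-- ===== VERDICT (by name: the statement is the Claim_ definition above) =====
theorem solution_spec : Claim_equal_solution := by
  intro numbers _
  unfold Spec_solution solution solution_alt
  exact List.map_congr_left (fun n _ => element_eq n)
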